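-- pv_equiv track=rewrite | github.com/etuthill/hamming_code_implementation | hamming_code_cyclic_parity_only.py | encode_cyclic_hamming
-- ===== SOURCE A (Python) =====
-- G = [1, 0, 1, 1]
--
-- def poly_mod(dividend, divisor):
--     dividend = dividend[:]
--     while dividend and dividend[0] == 0:
--         dividend.pop(0)
--
--     while len(dividend) >= len(divisor):
--         if dividend[0] == 1:
--             for i in range(len(divisor)):
--                 dividend[i] ^= divisor[i]
--         dividend.pop(0)
--         while dividend and dividend[0] == 0:
--             dividend.pop(0)
--
--     return dividend
--
-- def encode_cyclic_hamming(data_bits):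
--     extended = data_bits + [0, 0, 0]
--     remainder = poly_mod(extended, G)
--     remainder = [0] * (3 - len(remainder)) + remainder
--
--     codeword = []
--     for i in range(7):
--         if i < 4:
--             codeword.append(extended[i])
--         else:
--             codeword.append(extended[i] ^ remainder[i - 4])
--
--     return codeword
-- ===== SOURCE B (Python) =====
-- def encode_cyclic_hamming(data_bits):
--     # CRC-style 3-bit shift register instead of list-based polynomial long division
--     extended = data_bits + [0, 0, 0]
--     reg = [0, 0, 0]
--     for bit in extended:
--         out = reg[0]
--         reg = [reg[1], reg[2], bit]
--         if out == 1:
--             reg = [reg[0] ^ 0, reg[1] ^ 1, reg[2] ^ 1]  # xor with G[1:]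
--     return [extended[i] if i < 4 else extended[i] ^ reg[i - 4] for i in range(7)]
-- ===== Notes on version B (the rewrite author's own statement) =====
-- stated objective: alternative
-- what changed: Replaced poly_mod's list-mutating polynomial long division (leading-zero stripping, pops, re-padding) with a fixed-width 3-bit CRC shift register folded once over the extended bit stream; the codeword is built by a comprehension instead of an append loop.
import Mathlib
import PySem

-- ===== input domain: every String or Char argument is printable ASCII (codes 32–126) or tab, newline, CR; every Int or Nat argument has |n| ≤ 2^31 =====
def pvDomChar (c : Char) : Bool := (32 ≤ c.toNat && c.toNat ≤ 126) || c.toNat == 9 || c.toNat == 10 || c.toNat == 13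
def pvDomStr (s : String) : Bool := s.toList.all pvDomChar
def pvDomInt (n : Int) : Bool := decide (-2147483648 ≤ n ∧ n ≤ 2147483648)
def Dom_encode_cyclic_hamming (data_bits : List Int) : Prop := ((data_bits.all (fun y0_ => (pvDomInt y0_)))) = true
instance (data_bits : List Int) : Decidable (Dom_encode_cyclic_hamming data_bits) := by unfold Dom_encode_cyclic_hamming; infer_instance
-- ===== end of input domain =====

-- B replaces poly_mod's list-based long division by a 3-bit CRC shift register (alternative, same cost).

-- ===== PORT A =====
-- 'while dividend and dividend[0] == 0: dividend.pop(0)'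
def pyStrip : List Int → List Int
  | [] => []
  | x :: t => if x = 0 then pyStrip t else x :: t

lemma pyStrip_length_le (l : List Int) : (pyStrip l).length ≤ l.length := by
  induction l with
  | nil => simp [pyStrip]
  | cons x t ih =>
    simp only [pyStrip]
    split
    · simp; omega
    · simp

-- 'for i in range(len(divisor)): dividend[i] ^= divisor[i]' with G = [1,0,1,1]
def xorG : List Int → List Int
  | a :: b :: c :: e :: t =>
      (PySem.Int.bxor a 1) :: (PySem.Int.bxor b 0) :: (PySem.Int.bxor c 1) :: (PySem.Int.bxor e 1) :: t
  | l => l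

lemma xorG_length (l : List Int) : (xorG l).length = l.length := by
  unfold xorG; split <;> simp

-- the 'while len(dividend) >= len(divisor)' loop
def polyModLoop (d : List Int) : List Int :=
  if _h : 4 ≤ d.length then
    polyModLoop (pyStrip (if d.head? = some 1 then xorG d else d).tail)
  else d
  termination_by d.length
  decreasing_by
    simp only [dite_eq_ite]
    have h1 : (pyStrip (if d.head? = some 1 then xorG d else d).tail).length
        ≤ (if d.head? = some 1 then xorG d else d).tail.length := pyStrip_length_le _
    have h2 : (if d.head? = some 1 then xorG d else d).length = d.length := by
      split
      · exact xorG_length d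
      · rfl
    simp only [List.length_tail] at h1; omega

def poly_mod (dividend : List Int) : List Int := polyModLoop (pyStrip dividend)

def encode_cyclic_hamming (data_bits : List Int) : List Int :=
  let extended := data_bits ++ [0, 0, 0]
  let remainder := poly_mod extended
  let remainder := List.replicate (3 - remainder.length) 0 ++ remainder
  (PySem.List.pyRange 0 7 1).foldl
    (fun cw i =>
      if i < 4 then cw ++ [(PySem.List.pyGet? extended i).getD 0]
      else cw ++ [PySem.Int.bxor ((PySem.List.pyGet? extended i).getD 0)
                    ((PySem.List.pyGet? remainder (i - 4)).getD 0)])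
    []

-- ===== PORT B =====
def crcStep (r : Int × Int × Int) (bit : Int) : Int × Int × Int :=
  let out := r.1
  let reg := (r.2.1, r.2.2, bit)
  if out = 1 then (PySem.Int.bxor reg.1 0, PySem.Int.bxor reg.2.1 1, PySem.Int.bxor reg.2.2 1)
  else reg

def encode_cyclic_hamming_alt (data_bits : List Int) : List Int :=
  let extended := data_bits ++ [0, 0, 0]
  let reg := extended.foldl crcStep (0, 0, 0)
  let rlist := [reg.1, reg.2.1, reg.2.2]
  (PySem.List.pyRange 0 7 1).map
    (fun i =>
      if i < 4 then (PySem.List.pyGet? extended i).getD 0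
      else PySem.Int.bxor ((PySem.List.pyGet? extended i).getD 0)
             ((PySem.List.pyGet? rlist (i - 4)).getD 0))

-- ===== PRECONDITION & SPEC =====
-- Pre_ excludes data_bits shorter than 4, on which both programs raise IndexError (extended[i] for i up to 6).
def Pre_encode_cyclic_hamming (data_bits : List Int) : Prop := 4 ≤ data_bits.length
instance (data_bits : List Int) : Decidable (Pre_encode_cyclic_hamming data_bits) := by
  unfold Pre_encode_cyclic_hamming; infer_instance

def pvWitness_encode_cyclic_hamming : List Int := [1, 0, 1, 1]

def Spec_encode_cyclic_hamming (data_bits : List Int) (out : List Int) : Prop :=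
  out = encode_cyclic_hamming_alt data_bits
instance (data_bits : List Int) (out : List Int) : Decidable (Spec_encode_cyclic_hamming data_bits out) := by
  unfold Spec_encode_cyclic_hamming; infer_instance

-- ===== CLAIM (what is proved, stated in full; the proofs are below) =====
def Claim_equal_encode_cyclic_hamming : Prop :=
  ∀ (data_bits : List Int), Dom_encode_cyclic_hamming data_bits →
    Pre_encode_cyclic_hamming data_bits →
    Spec_encode_cyclic_hamming data_bits (encode_cyclic_hamming data_bits)

-- ===== LEMMAS AND PROOFS =====

-- key invariant: padded long-division remainder = CRC register contents
lemma pad_polyMod_eq_crc (rest : List Int) : ∀ (a b c : Int),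
    (let r := polyModLoop (pyStrip (a :: b :: c :: rest));
     List.replicate (3 - r.length) 0 ++ r)
    = (let g := List.foldl crcStep (a, b, c) rest; [g.1, g.2.1, g.2.2]) := by
  induction rest with
  | nil =>
    intro a b c
    simp only [List.foldl]
    have hlen : (pyStrip [a, b, c]).length < 4 := by
      have := pyStrip_length_le [a, b, c]; simp at this; omega
    unfold polyModLoop
    simp only [dif_neg (by omega : ¬ 4 ≤ (pyStrip [a, b, c]).length)]
    by_cases ha : a = 0 <;> by_cases hb : b = 0 <;> by_cases hc : c = 0 <;>
      simp [pyStrip, ha, hb, hc, List.replicate]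
  | cons x rs ih =>
    intro a b c
    by_cases ha : a = 0
    · -- leading zero is stripped; CRC shifts it out with no feedback
      subst ha
      have hstr : pyStrip (0 :: b :: c :: x :: rs) = pyStrip (b :: c :: x :: rs) := by
        simp [pyStrip]
      simp only [hstr, List.foldl, crcStep, if_neg (by norm_num : ¬ (0 : Int) = 1)]
      exact ih b c x
    · by_cases ha1 : a = 1
      · -- feedback step: xor with G then pop
        subst ha1
        have hs : pyStrip (1 :: b :: c :: x :: rs) = 1 :: b :: c :: x :: rs := by
          simp [pyStrip]
        rw [hs]; unfold polyModLoop
        rw [dif_pos (by simp only [List.length_cons]; omega)]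
        rw [show (if (1 :: b :: c :: x :: rs : List Int).head? = some 1
              then xorG (1 :: b :: c :: x :: rs) else (1 :: b :: c :: x :: rs))
            = xorG (1 :: b :: c :: x :: rs) from by simp [List.head?]]
        simp only [xorG, List.tail_cons, List.foldl]
        rw [show crcStep (1, b, c) x
            = (PySem.Int.bxor b 0, PySem.Int.bxor c 1, PySem.Int.bxor x 1) from by
          simp [crcStep]]
        exact ih (PySem.Int.bxor b 0) (PySem.Int.bxor c 1) (PySem.Int.bxor x 1)
      · -- non-1 head: pop without feedback
        have hs : pyStrip (a :: b :: c :: x :: rs) = a :: b :: c :: x :: rs := by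
          simp [pyStrip, ha]
        rw [hs]; unfold polyModLoop
        rw [dif_pos (by simp only [List.length_cons]; omega)]
        rw [show (if (a :: b :: c :: x :: rs : List Int).head? = some 1
              then xorG (a :: b :: c :: x :: rs) else (a :: b :: c :: x :: rs))
            = (a :: b :: c :: x :: rs) from by simp [List.head?, ha1]]
        simp only [List.tail_cons, List.foldl]
        rw [show crcStep (a, b, c) x = (b, c, x) from by simp [crcStep, ha1]]
        exact ih b c x

-- A's append loop over range(7) is B's comprehension
lemma foldl_ite_append {α β : Type} (p : β → Prop) [DecidablePred p] (u v : β → α)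
    (xs : List β) :
    xs.foldl (fun cw i => if p i then cw ++ [u i] else cw ++ [v i]) []
      = xs.map (fun i => if p i then u i else v i) := by
  have hbody : (fun (cw : List α) i => if p i then cw ++ [u i] else cw ++ [v i])
      = fun cw i => cw ++ [(fun i => if p i then u i else v i) i] := by
    funext cw i; by_cases h : p i <;> simp [h]
  rw [hbody, PySem.List.foldl_append_singleton_eq_map]; simp

-- ===== VERDICT (by name: the statement is the Claim_ definition above) =====
theorem encode_cyclic_hamming_spec : Claim_equal_encode_cyclic_hamming := by
  intro data_bits _ hpre
  unfold Pre_encode_cyclic_hamming at hpre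
  obtain ⟨a, t1⟩ : ∃ a t, data_bits = a :: t := by
    cases data_bits with
    | nil => simp at hpre
    | cons a t => exact ⟨a, t, rfl⟩
  obtain ⟨t, rfl⟩ := t1
  obtain ⟨b, t1⟩ : ∃ b t', t = b :: t' := by
    cases t with
    | nil => simp at hpre
    | cons b t' => exact ⟨b, t', rfl⟩
  obtain ⟨t', rfl⟩ := t1
  obtain ⟨c, t1⟩ : ∃ c t'', t' = c :: t'' := by
    cases t' with
    | nil => simp at hpre
    | cons c t'' => exact ⟨c, t'', rfl⟩
  obtain ⟨rest, rfl⟩ := t1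
  unfold Spec_encode_cyclic_hamming encode_cyclic_hamming encode_cyclic_hamming_alt poly_mod
  have hkey := pad_polyMod_eq_crc (rest ++ [0, 0, 0]) a b c
  simp only at hkey
  have hext : (a :: b :: c :: rest) ++ [0, 0, 0] = a :: b :: c :: (rest ++ [0, 0, 0]) := by simp
  have hfold : List.foldl crcStep (0, 0, 0) (a :: b :: c :: (rest ++ [0, 0, 0]))
      = List.foldl crcStep (a, b, c) (rest ++ [0, 0, 0]) := by
    simp [List.foldl, crcStep]
  simp only [hext, hfold, hkey]
  exact foldl_ite_append _ _ _ _
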